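-- pv_equiv track=rewrite | github.com/tjweisman/geometry_tools | geometry_tools/utils/words.py | free_abelian_words
-- ===== SOURCE A (Python) =====
-- from itertools import product
--
-- def invert_gen(generator):
--     if generator.lower() == generator:
--         return generator.upper()
--     return generator.lower()
--
-- def free_abelian_words(generators, length,
--                        metric="sup", inverses=None):
--     if inverses is None:
--         inverses = [invert_gen(g) for g in generators]
--
--     if metric == "sup":
--         g_list = list(generators)
--         n = len(g_list)
--         for counts in product(range(-length, length + 1), repeat=n):
--             word = ""
--             for i, count in enumerate(counts):
--                 if count < 0:
--                     word += inverses[i] * abs(count)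
--                 elif count > 0:
--                     word += g_list[i] * count
--             yield word
-- ===== SOURCE B (Python) =====
-- def invert_gen(generator):
--     if generator.lower() == generator:
--         return generator.upper()
--     return generator.lower()
--
--
-- def free_abelian_words(generators, length,
--                        metric="sup", inverses=None):
--     # Recursive backtracking over (generator, inverse) pairs: words are built
--     # directly, generator by generator, with no intermediate count tuples.
--     if inverses is None:
--         inverses = [invert_gen(g) for g in generators]
--
--     if metric != "sup":
--         return
--
--     def rec(pairs, prefix):
--         if not pairs:
--             yield prefix
--             return
--         (g, inv), rest = pairs[0], pairs[1:]
--         for count in range(-length, length + 1):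
--             if count < 0:
--                 seg = inv * (-count)
--             elif count > 0:
--                 seg = g * count
--             else:
--                 seg = ""
--             yield from rec(rest, prefix + seg)
--
--     yield from rec(list(zip(list(generators), inverses)), "")
-- ===== Notes on version B (the rewrite author's own statement) =====
-- stated objective: alternative
-- what changed: Replaces the itertools.product count-tuple enumeration plus a second enumerate/index pass per tuple with a recursive backtracking generator over the zipped (generator, inverse) pairs that builds each word directly while recursing.
-- outside the precondition, e.g. on free_abelian_words(['a'], -1, 'sup', []): A returns [], B returns ['']
import Mathlib
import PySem

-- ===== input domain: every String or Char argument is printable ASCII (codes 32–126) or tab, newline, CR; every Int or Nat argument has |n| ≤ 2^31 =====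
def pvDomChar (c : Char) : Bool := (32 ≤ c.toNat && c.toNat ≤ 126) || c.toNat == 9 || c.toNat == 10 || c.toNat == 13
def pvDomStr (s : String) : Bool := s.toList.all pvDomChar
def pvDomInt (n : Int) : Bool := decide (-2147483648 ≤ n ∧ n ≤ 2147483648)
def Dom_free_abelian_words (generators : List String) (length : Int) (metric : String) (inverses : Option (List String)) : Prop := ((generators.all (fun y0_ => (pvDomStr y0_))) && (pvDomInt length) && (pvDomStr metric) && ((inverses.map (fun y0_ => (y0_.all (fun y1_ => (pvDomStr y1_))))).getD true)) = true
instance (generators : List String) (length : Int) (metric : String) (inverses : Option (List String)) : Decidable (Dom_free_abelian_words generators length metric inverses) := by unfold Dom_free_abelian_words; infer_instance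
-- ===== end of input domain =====

-- B replaces A's itertools.product tuple enumeration + per-tuple indexing pass by a
-- recursive backtracking enumeration over the zipped (generator, inverse) pairs (alternative decomposition).


-- ===== PORT A =====
def pvInvertGen (s : String) : String :=
  if PySem.Str.lower s == s then PySem.Str.upper s else PySem.Str.lower s

-- Python's 's * k' on strings
def pvStrMul (s : String) (k : Int) : String :=
  String.ofList (PySem.List.pyRepeat s.toList k)

-- itertools.product(r, repeat=n), leftmost coordinate varying slowest
def pvProdRep (r : List Int) : Nat → List (List Int)
  | 0 => [[]]
  | n + 1 => r.flatMap (fun c => (pvProdRep r n).map (fun t => c :: t))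

-- the inner 'for i, count in enumerate(counts)' word-building loop of A
def pvWordOf (g inv : List String) (counts : List Int) : String :=
  (PySem.List.enumerate counts).foldl
    (fun w ic =>
      if ic.2 < 0 then w ++ pvStrMul (PySem.List.pyGetD inv ic.1 "") |ic.2|
      else if ic.2 > 0 then w ++ pvStrMul (PySem.List.pyGetD g ic.1 "") ic.2
      else w) ""

def free_abelian_words (generators : List String) (length : Int) (metric : String) (inverses : Option (List String)) : List String :=
  let inv := match inverses with
    | none => generators.map pvInvertGen
    | some l => l
  if metric == "sup" then
    let g_list := generators
    let n := g_list.length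
    (pvProdRep (PySem.List.pyRange (-length) (length + 1) 1) n).map (pvWordOf g_list inv)
  else []

-- ===== PORT B =====
-- the recursive backtracking helper rec(pairs, prefix) of Source B
def pvAltRec (length : Int) : List (String × String) → String → List String
  | [], pre => [pre]
  | p :: rest, pre =>
      (PySem.List.pyRange (-length) (length + 1) 1).flatMap (fun c =>
        let seg := if c < 0 then pvStrMul p.2 (-c)
                   else if c > 0 then pvStrMul p.1 c
                   else ""
        pvAltRec length rest (pre ++ seg))

def free_abelian_words_alt (generators : List String) (length : Int) (metric : String) (inverses : Option (List String)) : List String :=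
  let inv := match inverses with
    | none => generators.map pvInvertGen
    | some l => l
  if metric == "sup" then pvAltRec length (generators.zip inv) ""
  else []

-- ===== PRECONDITION & SPEC =====
-- Pre_ excludes an explicitly provided inverses list shorter than the generators list under
-- metric "sup": there A raises IndexError whenever a negative count is reached, and on the
-- remaining non-positive lengths the corner is unspecified (the missing inverses are never
-- used), where B's truncation to the paired generators is an equally defensible choice.
def Pre_free_abelian_words (generators : List String) (length : Int) (metric : String) (inverses : Option (List String)) : Prop :=
  (match inverses with
   | none => true
   | some l => (metric != "sup" || decide (generators.length ≤ l.length) : Bool)) = true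
instance (generators : List String) (length : Int) (metric : String) (inverses : Option (List String)) : Decidable (Pre_free_abelian_words generators length metric inverses) := by unfold Pre_free_abelian_words; infer_instance

def pvWitness_free_abelian_words : List String × Int × String × Option (List String) :=
  (["a", "B"], 1, "sup", none)

def Spec_free_abelian_words (generators : List String) (length : Int) (metric : String) (inverses : Option (List String)) (out : List String) : Prop := out = free_abelian_words_alt generators length metric inverses
instance (generators : List String) (length : Int) (metric : String) (inverses : Option (List String)) (out : List String) : Decidable (Spec_free_abelian_words generators length metric inverses out) := by unfold Spec_free_abelian_words; infer_instance

-- ===== CLAIM (what is proved, stated in full; the proofs are below) =====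
def Claim_equal_free_abelian_words : Prop := ∀ (generators : List String) (length : Int) (metric : String) (inverses : Option (List String)), Dom_free_abelian_words generators length metric inverses → Pre_free_abelian_words generators length metric inverses → Spec_free_abelian_words generators length metric inverses (free_abelian_words generators length metric inverses)

-- ===== LEMMAS AND PROOFS =====

-- the word a counts-tuple denotes, pointwise along the (generator, inverse) pairs
def pvSegCat : List Int → List (String × String) → String
  | [], _ => ""
  | _ :: _, [] => ""
  | c :: cs, p :: ps =>
      (if c < 0 then pvStrMul p.2 (-c) else if c > 0 then pvStrMul p.1 c else "") ++ pvSegCat cs ps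

theorem length_mem_pvProdRep {r : List Int} : ∀ {n : Nat} {s : List Int}, s ∈ pvProdRep r n → s.length = n := by
  intro n
  induction n with
  | zero => intro s hs; simp [pvProdRep] at hs; simp [hs]
  | succ m ih =>
      intro s hs
      simp [pvProdRep] at hs
      obtain ⟨c, -, t, ht, rfl⟩ := hs
      simp [ih ht]

theorem pvAltRec_eq (L : Int) : ∀ (ps : List (String × String)) (p : String),
    pvAltRec L ps p = (pvProdRep (PySem.List.pyRange (-L) (L + 1) 1) ps.length).map (fun s => p ++ pvSegCat s ps) := by
  intro ps
  induction ps with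
  | nil => intro p; simp [pvAltRec, pvProdRep, pvSegCat]
  | cons q rest ih =>
      intro p
      simp only [pvAltRec, List.length_cons, pvProdRep, List.map_flatMap, List.map_map]
      refine List.flatMap_congr ?_
      intro c _
      rw [ih]
      refine List.map_congr_left ?_
      intro s _
      simp [pvSegCat, Function.comp, String.append_assoc]

theorem pvWordOf_foldl (g inv : List String) : ∀ (counts : List Int) (k : Nat) (w : String),
    counts.length + k ≤ g.length → counts.length + k ≤ inv.length →
    (PySem.List.enumerate counts (k : Int)).foldl
      (fun w ic =>
        if ic.2 < 0 then w ++ pvStrMul (PySem.List.pyGetD inv ic.1 "") |ic.2|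
        else if ic.2 > 0 then w ++ pvStrMul (PySem.List.pyGetD g ic.1 "") ic.2
        else w) w
      = w ++ pvSegCat counts ((g.drop k).zip (inv.drop k)) := by
  intro counts
  induction counts with
  | nil => intro k w _ _; simp [PySem.List.enumerate_nil, pvSegCat]
  | cons c cs ih =>
      intro k w hg hinv
      have hkg : k < g.length := by simp at hg; omega
      have hki : k < inv.length := by simp at hinv; omega
      rw [PySem.List.enumerate_cons, List.foldl_cons]
      have hcast : (k : Int) + 1 = ((k + 1 : Nat) : Int) := by push_cast; ring
      rw [hcast, ih (k + 1) _ (by simp at hg ⊢; omega) (by simp at hinv ⊢; omega)]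
      rw [List.drop_eq_getElem_cons hkg, List.drop_eq_getElem_cons hki]
      simp only [List.zip_cons_cons, pvSegCat]
      have hgget : PySem.List.pyGetD g (k : Int) "" = g[k] := by
        rw [PySem.List.pyGetD_natCast]; simp [List.getD, hkg]
      have higet : PySem.List.pyGetD inv (k : Int) "" = inv[k] := by
        rw [PySem.List.pyGetD_natCast]; simp [List.getD, hki]
      by_cases hneg : c < 0
      · have : |c| = -c := abs_of_neg hneg
        simp [hneg, this, higet, String.append_assoc]
      · by_cases hpos : c > 0
        · simp [hneg, hpos, hgget, String.append_assoc]
        · simp [hneg, hpos]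

theorem pvWordOf_eq (g inv : List String) (counts : List Int)
    (hg : counts.length ≤ g.length) (hinv : counts.length ≤ inv.length) :
    pvWordOf g inv counts = pvSegCat counts (g.zip inv) := by
  have := pvWordOf_foldl g inv counts 0 "" (by omega) (by omega)
  simpa [pvWordOf, String.empty_append] using this

theorem both_sides_eq (g inv : List String) (L : Int) (hlen : g.length ≤ inv.length) :
    (pvProdRep (PySem.List.pyRange (-L) (L + 1) 1) g.length).map (pvWordOf g inv)
      = pvAltRec L (g.zip inv) "" := by
  have hz : (g.zip inv).length = g.length := by
    simp [List.length_zip]; omega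
  rw [pvAltRec_eq, hz]
  refine List.map_congr_left ?_
  intro s hs
  have hslen : s.length = g.length := length_mem_pvProdRep hs
  rw [pvWordOf_eq g inv s (by omega) (by omega), String.empty_append]

-- ===== VERDICT (by name: the statement is the Claim_ definition above) =====
theorem free_abelian_words_spec : Claim_equal_free_abelian_words := by
  intro generators length metric inverses _ hpre
  unfold Spec_free_abelian_words free_abelian_words free_abelian_words_alt
  by_cases hm : metric == "sup"
  · simp only [hm, if_true]
    cases inverses with
    | none =>
        exact both_sides_eq generators (generators.map pvInvertGen) length (by simp)
    | some l =>
        have hms : metric = "sup" := by simpa using hm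
        have hlen : generators.length ≤ l.length := by
          unfold Pre_free_abelian_words at hpre
          simpa [hms] using hpre
        exact both_sides_eq generators l length hlen
  · simp [hm]
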